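-- pv_equiv track=rewrite | github.com/SylphAI-Inc/AdalFlow | core/document_splitter.py | _split_into_units
-- ===== SOURCE A (Python) =====
-- from typing import List, Literal
--
-- def _split_into_units(
--     text: str, split_by: Literal["word", "sentence", "passage", "page"]
-- ) -> List[str]:
--     if split_by == "page":
--         split_at = "\f"
--     elif split_by == "passage":
--         split_at = "\n\n"
--     elif split_by == "sentence":
--         split_at = "."
--     elif split_by == "word":
--         split_at = " "
--     else:
--         raise NotImplementedError(
--             "DocumentSplitter only supports 'word', 'sentence', 'page' or 'passage' split_by options."
--         )
--     units = text.split(split_at)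
--     # Add the delimiter back to all units except the last one
--     for i in range(len(units) - 1):
--         units[i] += split_at
--     return units
-- ===== SOURCE B (Python) =====
-- from typing import List, Literal
--
-- def _split_into_units(
--     text: str, split_by: Literal["word", "sentence", "passage", "page"]
-- ) -> List[str]:
--     if split_by == "page":
--         split_at = "\f"
--     elif split_by == "passage":
--         split_at = "\n\n"
--     elif split_by == "sentence":
--         split_at = "."
--     elif split_by == "word":
--         split_at = " "
--     else:
--         raise NotImplementedError(
--             "DocumentSplitter only supports 'word', 'sentence', 'page' or 'passage' split_by options."
--         )
--     # Single streaming pass: grow a buffer character by character and emit a unit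
--     # (delimiter included) each time the buffer ends with the delimiter; the final
--     # buffer is the last, bare unit. No str.split and no re-append pass.
--     units = []
--     buf = ""
--     for ch in text:
--         buf += ch
--         if buf.endswith(split_at):
--             units.append(buf)
--             buf = ""
--     units.append(buf)
--     return units
-- ===== Notes on version B (the rewrite author's own statement) =====
-- stated objective: alternative
-- what changed: Replaces str.split plus a second index loop mutating the list to re-append the delimiter with a single streaming character pass that grows a buffer and emits a unit (delimiter already attached) whenever the buffer ends with the delimiter, the final buffer being the last bare unit.
import Mathlib
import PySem

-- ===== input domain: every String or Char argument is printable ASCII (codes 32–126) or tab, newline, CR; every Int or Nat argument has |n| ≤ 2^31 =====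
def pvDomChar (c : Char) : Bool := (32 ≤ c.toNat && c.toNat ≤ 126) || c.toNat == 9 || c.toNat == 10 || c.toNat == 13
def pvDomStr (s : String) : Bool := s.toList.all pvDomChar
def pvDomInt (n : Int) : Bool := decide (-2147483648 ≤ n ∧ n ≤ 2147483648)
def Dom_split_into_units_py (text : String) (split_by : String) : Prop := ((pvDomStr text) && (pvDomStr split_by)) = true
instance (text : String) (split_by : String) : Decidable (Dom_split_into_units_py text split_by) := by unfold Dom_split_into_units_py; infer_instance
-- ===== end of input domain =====

-- B replaces str.split + a second pass re-appending the delimiter by ONE streaming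
-- character pass (grow a buffer, emit a unit whenever it ends with the delimiter);
-- objective: alternative.

-- ===== PORT A =====
-- the for-loop `for i in range(len(units)-1): units[i] += split_at`:
-- appends split_at to every unit except the last
def pvAppendButLast (d : String) : List String → List String
  | [] => []
  | [u] => [u]
  | u :: rest => (u ++ d) :: pvAppendButLast d rest

def split_into_units_py (text : String) (split_by : String) : List String :=
  if split_by == "page" then
    pvAppendButLast "\x0c" (((PySem.Str.split? text "\x0c").getD []))
  else if split_by == "passage" then
    pvAppendButLast "\n\n" (((PySem.Str.split? text "\n\n").getD []))
  else if split_by == "sentence" then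
    pvAppendButLast "." (((PySem.Str.split? text ".").getD []))
  else if split_by == "word" then
    pvAppendButLast " " (((PySem.Str.split? text " ").getD []))
  else []  -- Python raises NotImplementedError here; excluded by Pre_

-- ===== PORT B =====
-- the loop body: buf += ch; if buf.endswith(split_at): units.append(buf); buf = ""
def pvScanStep (d : List Char) (st : List (List Char) × List Char) (c : Char) :
    List (List Char) × List Char :=
  let buf := st.2 ++ [c]
  if PySem.Chars.endswith buf d then (st.1 ++ [buf], []) else (st.1, buf)

-- the whole scan: fold the step over the characters, then units.append(buf)
def pvScan (d : List Char) (text : List Char) : List String :=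
  let st := text.foldl (pvScanStep d) ([], [])
  (st.1 ++ [st.2]).map String.ofList

def split_into_units_py_alt (text : String) (split_by : String) : List String :=
  if split_by == "page" then pvScan ['\x0c'] text.toList
  else if split_by == "passage" then pvScan ['\n', '\n'] text.toList
  else if split_by == "sentence" then pvScan ['.'] text.toList
  else if split_by == "word" then pvScan [' '] text.toList
  else []  -- raise NotImplementedError; excluded by Pre_

-- ===== PRECONDITION & SPEC =====
-- A raises NotImplementedError for any split_by outside the four supported options.
def Pre_split_into_units_py (text : String) (split_by : String) : Prop :=
  split_by = "page" ∨ split_by = "passage" ∨ split_by = "sentence" ∨ split_by = "word"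
instance (text : String) (split_by : String) : Decidable (Pre_split_into_units_py text split_by) := by
  unfold Pre_split_into_units_py; infer_instance

def pvWitness_split_into_units_py : String × String := ("a b. c", "sentence")

def Spec_split_into_units_py (text : String) (split_by : String) (out : List String) : Prop := out = split_into_units_py_alt text split_by
instance (text : String) (split_by : String) (out : List String) : Decidable (Spec_split_into_units_py text split_by out) := by unfold Spec_split_into_units_py; infer_instance

-- ===== CLAIM =====
def Claim_equal_split_into_units_py : Prop := ∀ (text : String) (split_by : String), Dom_split_into_units_py text split_by → Pre_split_into_units_py text split_by → Spec_split_into_units_py text split_by (split_into_units_py text split_by)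

-- ===== LEMMAS AND PROOFS =====

-- char-level mirror of pvAppendButLast, for reasoning below the String wrapper
def cAppendButLast (d : List Char) : List (List Char) → List (List Char)
  | [] => []
  | [u] => [u]
  | u :: rest => (u ++ d) :: cAppendButLast d rest

theorem pvAppendButLast_map (d : List Char) (xs : List (List Char)) :
    pvAppendButLast (String.ofList d) (xs.map String.ofList)
      = (cAppendButLast d xs).map String.ofList := by
  induction xs with
  | nil => rfl
  | cons u rest ih =>
    cases rest with
    | nil => rfl
    | cons v rest' =>
      simp only [List.map, pvAppendButLast, cAppendButLast] at ih ⊢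
      rw [← String.ofList_append]
      exact congrArg _ ih

theorem cAppendButLast_cons (d u : List Char) (xs : List (List Char)) (h : xs ≠ []) :
    cAppendButLast d (u :: xs) = (u ++ d) :: cAppendButLast d xs := by
  obtain ⟨y, ys, rfl⟩ := List.exists_cons_of_ne_nil h
  rfl

-- unfolding equations for PySem.Chars.splitOn.go
theorem go_zero (d : List Char) (l cur acc) :
    PySem.Chars.splitOn.go d 0 l cur acc = ((cur.reverse ++ l) :: acc).reverse := by
  cases l <;> simp [PySem.Chars.splitOn.go]

theorem go_nil (d : List Char) (f : Nat) (cur acc) :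
    PySem.Chars.splitOn.go d (f + 1) [] cur acc = (cur.reverse :: acc).reverse := by
  simp [PySem.Chars.splitOn.go]

theorem go_cons (d : List Char) (f : Nat) (c : Char) (rest cur acc) :
    PySem.Chars.splitOn.go d (f + 1) (c :: rest) cur acc
      = if d.isPrefixOf (c :: rest) then
          PySem.Chars.splitOn.go d f (List.drop d.length (c :: rest)) [] (cur.reverse :: acc)
        else PySem.Chars.splitOn.go d f rest (c :: cur) acc := by
  simp [PySem.Chars.splitOn.go]

-- the accumulator is just prepended (reversed) to the result
theorem go_acc (d : List Char) (fuel : Nat) :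
    ∀ (l cur acc), PySem.Chars.splitOn.go d fuel l cur acc
      = acc.reverse ++ PySem.Chars.splitOn.go d fuel l cur [] := by
  induction fuel with
  | zero => intro l cur acc; simp [go_zero]
  | succ f ih =>
    intro l cur acc
    cases l with
    | nil => simp [go_nil]
    | cons c rest =>
      rw [go_cons, go_cons]
      split
      · rw [ih _ [] (cur.reverse :: acc), ih _ [] (cur.reverse :: ([] : List (List Char)))]
        simp
      · rw [ih rest (c :: cur) acc]

theorem go_ne_nil (d : List Char) (fuel : Nat) :
    ∀ (l cur acc), PySem.Chars.splitOn.go d fuel l cur acc ≠ [] := by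
  induction fuel with
  | zero => intro l cur acc; simp [go_zero]
  | succ f ih =>
    intro l cur acc
    cases l with
    | nil => simp [go_nil]
    | cons c rest => rw [go_cons]; split <;> exact ih _ _ _

-- fuel irrelevance while fuel exceeds the remaining length
theorem go_fuel (d : List Char) (hd : d ≠ []) :
    ∀ (n : Nat) (l : List Char) (f₁ f₂ : Nat) (cur acc),
      l.length = n → l.length < f₁ → l.length < f₂ →
      PySem.Chars.splitOn.go d f₁ l cur acc = PySem.Chars.splitOn.go d f₂ l cur acc := by
  intro n
  induction n using Nat.strong_induction_on with
  | _ n ih =>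
    intro l f₁ f₂ cur acc hn h1 h2
    cases l with
    | nil =>
      cases f₁ with
      | zero => omega
      | succ g₁ =>
        cases f₂ with
        | zero => omega
        | succ g₂ => rw [go_nil, go_nil]
    | cons c rest =>
      cases f₁ with
      | zero => simp at h1
      | succ g₁ =>
        cases f₂ with
        | zero => simp at h2
        | succ g₂ =>
          rw [go_cons, go_cons]
          split
          · have hdl : 0 < d.length := List.length_pos_iff.mpr hd
            have hlen : (List.drop d.length (c :: rest)).length = (c :: rest).length - d.length := by
              simp
            exact ih ((List.drop d.length (c :: rest)).length)
              (by rw [hlen]; simp at hn ⊢; omega) _ g₁ g₂ _ _ rfl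
              (by rw [hlen]; simp at h1 ⊢; omega) (by rw [hlen]; simp at h2 ⊢; omega)
          · exact ih rest.length (by simp at hn; omega) rest g₁ g₂ _ _ rfl
              (by simp at h1; omega) (by simp at h2; omega)

-- no occurrence of d in l: the scan never matches
theorem go_no_match (d : List Char) (_hd : d ≠ []) :
    ∀ (l : List Char) (f : Nat) (cur acc), ¬ d <:+: l → l.length < f →
      PySem.Chars.splitOn.go d f l cur acc = ((cur.reverse ++ l) :: acc).reverse := by
  intro l
  induction l with
  | nil =>
    intro f cur acc _ hf
    cases f with
    | zero => omega
    | succ g => rw [go_nil]; simp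
  | cons c rest ih =>
    intro f cur acc hinf hf
    cases f with
    | zero => simp at hf
    | succ g =>
      rw [go_cons]
      have hnp : d.isPrefixOf (c :: rest) = false := by
        by_contra h
        exact hinf ((List.isPrefixOf_iff_prefix.mp (by simpa using h)).isInfix)
      rw [hnp]
      simp only [Bool.false_eq_true, if_false]
      rw [ih g (c :: cur) acc (fun h => hinf (h.trans (List.suffix_cons c rest).isInfix))
        (by simp at hf ⊢; omega)]
      simp

theorem splitOn_no_match (d : List Char) (hd : d ≠ []) (s : List Char) (h : ¬ d <:+: s) :
    PySem.Chars.splitOn s d = [s] := by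
  unfold PySem.Chars.splitOn
  rw [go_no_match d hd s (s.length + 1) [] [] h (by omega)]
  simp

-- first occurrence: the scan walks past u, matches d, and restarts on rest
theorem go_first_match (d : List Char) (hd : d ≠ []) :
    ∀ (u rest : List Char) (f : Nat) (cur acc),
      ¬ d <:+: (u ++ d).dropLast → (u ++ d ++ rest).length < f →
      PySem.Chars.splitOn.go d f (u ++ d ++ rest) cur acc
        = PySem.Chars.splitOn.go d (f - u.length - 1) rest [] ((cur.reverse ++ u) :: acc) := by
  intro u
  induction u with
  | nil =>
    intro rest f cur acc _ hf
    cases f with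
    | zero => simp at hf
    | succ g =>
      obtain ⟨dc, dt, rfl⟩ : ∃ dc dt, d = dc :: dt := by
        cases d with
        | nil => exact absurd rfl hd
        | cons a b => exact ⟨a, b, rfl⟩
      rw [show ([] : List Char) ++ (dc :: dt) ++ rest = dc :: (dt ++ rest) by simp, go_cons]
      have hp : (dc :: dt).isPrefixOf (dc :: (dt ++ rest)) = true :=
        List.isPrefixOf_iff_prefix.mpr ⟨rest, by simp⟩
      rw [hp]
      simp only [if_true]
      rw [show List.drop (dc :: dt).length (dc :: (dt ++ rest))
            = List.drop (dc :: dt).length ((dc :: dt) ++ rest) by simp,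
          List.drop_left]
      simp
  | cons a u' ih =>
    intro rest f cur acc hinf hf
    cases f with
    | zero => simp at hf
    | succ g =>
      rw [show (a :: u') ++ d ++ rest = a :: (u' ++ d ++ rest) by simp, go_cons]
      have hdl : u' ++ d ≠ [] := by
        intro h
        exact hd (by simpa using (List.append_eq_nil_iff.mp h).2)
      have hdrop : ((a :: u') ++ d).dropLast = a :: (u' ++ d).dropLast := by
        rw [show (a :: u') ++ d = a :: (u' ++ d) by simp]
        exact List.dropLast_cons_of_ne_nil hdl
      have hnp : d.isPrefixOf (a :: (u' ++ d ++ rest)) = false := by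
        by_contra h
        have hpre : d <+: a :: (u' ++ d ++ rest) := List.isPrefixOf_iff_prefix.mp (by simpa using h)
        have hpre2 : ((a :: u') ++ d).dropLast <+: a :: (u' ++ d ++ rest) := by
          refine (List.dropLast_prefix _).trans ?_
          rw [show a :: (u' ++ d ++ rest) = ((a :: u') ++ d) ++ rest by simp]
          exact List.prefix_append _ _
        have hlen : d.length ≤ (((a :: u') ++ d).dropLast).length := by
          simp [List.length_dropLast]
        exact hinf ((List.prefix_of_prefix_length_le hpre hpre2 hlen).isInfix)
      rw [hnp]
      simp only [Bool.false_eq_true, if_false]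
      have hinf' : ¬ d <:+: (u' ++ d).dropLast := by
        intro h
        exact hinf (by rw [hdrop]; exact h.trans (List.suffix_cons a _).isInfix)
      rw [ih rest g (a :: cur) acc hinf' (by simp at hf ⊢; omega)]
      have hfe : g - u'.length - 1 = g + 1 - (a :: u').length - 1 := by simp
      rw [hfe]
      simp

theorem splitOn_first (d : List Char) (hd : d ≠ []) (u rest : List Char)
    (h : ¬ d <:+: (u ++ d).dropLast) :
    PySem.Chars.splitOn (u ++ d ++ rest) d = u :: PySem.Chars.splitOn rest d := by
  have hdl : 0 < d.length := List.length_pos_iff.mpr hd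
  unfold PySem.Chars.splitOn
  rw [go_first_match d hd u rest ((u ++ d ++ rest).length + 1) [] [] h (by omega)]
  rw [go_fuel d hd rest.length rest ((u ++ d ++ rest).length + 1 - u.length - 1)
    (rest.length + 1) [] _ rfl (by simp; omega) (by omega)]
  rw [go_acc]
  simp

-- the streaming scan equals split-then-reappend, given no occurrence of d inside buf
theorem scan_inv (d : List Char) (hd : d ≠ []) :
    ∀ (l buf : List Char) (units : List (List Char)), ¬ d <:+: buf →
      (l.foldl (pvScanStep d) (units, buf)).1 ++ [(l.foldl (pvScanStep d) (units, buf)).2]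
        = units ++ cAppendButLast d (PySem.Chars.splitOn (buf ++ l) d) := by
  intro l
  induction l with
  | nil =>
    intro buf units h
    simp only [List.foldl]
    rw [List.append_nil, splitOn_no_match d hd buf h]
    rfl
  | cons c rest ih =>
    intro buf units hinf
    simp only [List.foldl]
    by_cases hm : PySem.Chars.endswith (buf ++ [c]) d = true
    · rw [show pvScanStep d (units, buf) c = (units ++ [buf ++ [c]], []) by
        simp [pvScanStep, hm]]
      rw [ih [] (units ++ [buf ++ [c]]) (by simpa [List.infix_nil] using hd)]
      obtain ⟨u, hu⟩ : ∃ u, u ++ d = buf ++ [c] :=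
        List.isSuffixOf_iff_suffix.mp (by simpa [PySem.Chars.endswith] using hm)
      rw [show buf ++ (c :: rest) = u ++ d ++ rest by rw [hu]; simp]
      rw [splitOn_first d hd u rest (by rw [hu]; simpa using hinf)]
      rw [cAppendButLast_cons d u _ (by unfold PySem.Chars.splitOn; exact go_ne_nil d _ _ _ _)]
      rw [hu]
      simp
    · rw [show pvScanStep d (units, buf) c = (units, buf ++ [c]) by simp [pvScanStep, hm]]
      have hinf' : ¬ d <:+: (buf ++ [c]) := by
        intro h
        obtain ⟨s, t, hst⟩ := h
        cases t using List.reverseRecOn with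
        | nil =>
          exact hm (List.isSuffixOf_iff_suffix.mpr ⟨s, by simpa using hst⟩)
        | append_singleton t' c' _ =>
          have hst' : (s ++ d ++ t') ++ [c'] = buf ++ [c] := by
            rw [← hst]; simp
          have hlen : (s ++ d ++ t').length = buf.length := by
            have := congrArg List.length hst'
            simp at this ⊢; omega
          obtain ⟨h1, _⟩ := List.append_inj hst' (by simpa using hlen)
          exact hinf ⟨s, t', h1⟩
      rw [ih (buf ++ [c]) units hinf']
      simp

-- per-delimiter bridge between the two ports
theorem pvPorts_agree (d : List Char) (hd : d ≠ []) (text : String) :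
    pvAppendButLast (String.ofList d) ((PySem.Str.split? text (String.ofList d)).getD [])
      = pvScan d text.toList := by
  have hde : d.isEmpty = false := by
    cases d with
    | nil => exact absurd rfl hd
    | cons a b => rfl
  rw [show PySem.Str.split? text (String.ofList d)
        = some ((PySem.Chars.splitOn text.toList d).map String.ofList) by
      simp [PySem.Str.split?, PySem.Chars.split?, hde]]
  rw [Option.getD_some, pvAppendButLast_map]
  unfold pvScan
  have := scan_inv d hd text.toList [] []
  simp only [List.nil_append] at this
  rw [← this (by simpa [List.infix_nil] using hd)]

-- ===== VERDICT =====
theorem split_into_units_py_spec : Claim_equal_split_into_units_py := by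
  intro text split_by _ hpre
  unfold Spec_split_into_units_py split_into_units_py split_into_units_py_alt
  rcases hpre with h | h | h | h <;> subst h <;>
    simp only [beq_self_eq_true, if_true, String.reduceBEq, Bool.false_eq_true, if_false] <;>
    exact pvPorts_agree _ (by decide) _
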